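-- pv_equiv track=rewrite | github.com/google-research/google-research | cubert/unified_tokenizer.py | code_to_tokens_simple_lossless
-- ===== SOURCE A (Python) =====
-- import enum
--
-- class StateType(enum.IntEnum):
--   INITIAL_STATE = 0
--   UPPERCASE_STATE = 1
--   LOWERCASE_STATE = 2
--   NUMBER_STATE = 3
--   SPECIAL_STATE = 4
--
-- def code_to_tokens_simple_lossless(code):
--   r"""Convert python source code to list of tokens.
--
--   This is a simple version using spacing and different classes of characters to
--   tokenize a string.
--
--   A sentence will be split at "|" in the following patterns:
--     upper | upper lower
--     upper | number
--     upper | special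
--     lower | upper
--     lower | number
--     lower | special
--     number | upper
--     number | lower
--     number | special
--     special | upper
--     special | lower
--     special | number
--
--   In addition to splits caused by the type changes above, the code is also split
--   at whitespace. However, a sequence of spaces or tabs will not be split unless
--   its length is longer than 20.
--
--   For example: "12345  \n\n678" -> ["12345", "  ", "\n", "\n", "678"]
--
--   We do not split sequences of spaces/tabs to avoid long sequences of single
--   " " or "\t" tokens caused by deep indentation.
--
--   This tokenizer uses a finite state machine. The definition of the states is in
--   the StateType class.
--
--   Args:
--     code: String containing Python source code.
--
--   Returns:
--     The code represented as a string of tokens separated by spaces.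
--     For example, "foo  ,1" -> ["foo", "  ", ",", "1"]
--   """
--   # normal state transitions that will result in splitting
--   normal_transitions = [
--       (StateType.UPPERCASE_STATE, StateType.NUMBER_STATE),
--       (StateType.UPPERCASE_STATE, StateType.SPECIAL_STATE),
--       (StateType.LOWERCASE_STATE, StateType.UPPERCASE_STATE),
--       (StateType.LOWERCASE_STATE, StateType.NUMBER_STATE),
--       (StateType.LOWERCASE_STATE, StateType.SPECIAL_STATE),
--       (StateType.NUMBER_STATE, StateType.UPPERCASE_STATE),
--       (StateType.NUMBER_STATE, StateType.LOWERCASE_STATE),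
--       (StateType.NUMBER_STATE, StateType.SPECIAL_STATE),
--       (StateType.SPECIAL_STATE, StateType.UPPERCASE_STATE),
--       (StateType.SPECIAL_STATE, StateType.LOWERCASE_STATE),
--       (StateType.SPECIAL_STATE, StateType.NUMBER_STATE)]
--   # output, state
--   tokens = []
--   state = StateType.INITIAL_STATE
--   next_state = None
--   memory = []
--   for i, inputchar in enumerate(code):
--     if inputchar.isupper():
--       next_state = StateType.UPPERCASE_STATE
--     elif inputchar.islower():
--       next_state = StateType.LOWERCASE_STATE
--     elif inputchar.isdigit():
--       next_state = StateType.NUMBER_STATE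
--     else:
--       next_state = StateType.SPECIAL_STATE
--
--     # splitting cases
--     if (state, next_state) in normal_transitions:
--       tokens.append(''.join(memory))
--       memory = []
--     elif (state, next_state) == (StateType.UPPERCASE_STATE,
--                                  StateType.LOWERCASE_STATE) and len(memory) > 1:
--       tokens.append(''.join(memory[:-1]))
--       memory = [memory[-1]]
--     elif (state, next_state) == (StateType.SPECIAL_STATE,
--                                  StateType.SPECIAL_STATE):
--       if inputchar in [' ', '\t'] and inputchar == code[i-1]:
--         if len(memory) >= 20:
--           tokens.append(''.join(memory))
--           memory = []
--       elif inputchar.isspace() or code[i-1].isspace():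
--         tokens.append(''.join(memory))
--         memory = []
--
--     # put inputchar into memory, always
--     memory.append(inputchar)
--     state = next_state
--   if memory:
--     tokens.append(''.join(memory))
--   return tokens
-- ===== SOURCE B (Python) =====
-- def code_to_tokens_simple_lossless(code):
--     """Boundary-index tokenizer: classify chars, record split positions, slice once."""
--     n = len(code)
--     if n == 0:
--         return []
--
--     def cls(c):
--         if c.isupper():
--             return 0
--         if c.islower():
--             return 1
--         if c.isdigit():
--             return 2
--         return 3
--
--     bounds = [0]
--     start = 0
--     for i in range(1, n):
--         p, q = cls(code[i - 1]), cls(code[i])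
--         cut = None
--         if p != q:
--             if p == 0 and q == 1:
--                 if i - start > 1:
--                     cut = i - 1
--             else:
--                 cut = i
--         elif p == 3:
--             if code[i] in (' ', '\t') and code[i] == code[i - 1]:
--                 if i - start >= 20:
--                     cut = i
--             elif code[i].isspace() or code[i - 1].isspace():
--                 cut = i
--         if cut is not None:
--             bounds.append(cut)
--             start = cut
--     bounds.append(n)
--     return [code[a:b] for a, b in zip(bounds, bounds[1:])]
-- ===== Notes on version B (the rewrite author's own statement) =====
-- stated objective: faster
-- what changed: B replaces A's state-machine loop that accumulates a character buffer and joins it into each token by a boundary-index scan: it classifies adjacent character pairs, records split positions (including the retroactive upper-to-lower split and the 20-long space-run rule via the running segment start), and produces all tokens with one final slicing pass.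
import Mathlib
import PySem

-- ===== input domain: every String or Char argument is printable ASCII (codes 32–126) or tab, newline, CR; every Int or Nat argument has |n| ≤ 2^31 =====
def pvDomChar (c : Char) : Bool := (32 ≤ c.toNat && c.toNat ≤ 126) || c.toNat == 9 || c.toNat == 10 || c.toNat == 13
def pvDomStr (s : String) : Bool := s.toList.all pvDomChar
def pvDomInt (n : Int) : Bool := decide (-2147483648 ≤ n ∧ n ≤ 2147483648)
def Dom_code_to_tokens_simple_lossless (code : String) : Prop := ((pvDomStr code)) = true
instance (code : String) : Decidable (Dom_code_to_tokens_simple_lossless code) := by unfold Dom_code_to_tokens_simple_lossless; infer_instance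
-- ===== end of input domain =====

-- B replaces A's accumulate-and-join state machine by a boundary-index scan (classify adjacent
-- chars, record split positions, slice once at the end); measurably faster by a constant factor.

-- ===== PORT A =====
inductive StateType
  | initial | upper | lower | number | special
deriving DecidableEq, Repr

def pvNormalTransitions : List (StateType × StateType) :=
  [(.upper, .number), (.upper, .special),
   (.lower, .upper), (.lower, .number), (.lower, .special),
   (.number, .upper), (.number, .lower), (.number, .special),
   (.special, .upper), (.special, .lower), (.special, .number)]

-- A's inline isupper/islower/isdigit chain computing next_state
def pvClassify (c : Char) : StateType :=
  if PySem.Chars.isupper c then .upper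
  else if PySem.Chars.islower c then .lower
  else if PySem.Chars.isdigit c then .number
  else .special

-- A's loop body; state = (tokens, state, memory); code[i-1] is PySem.List.pyGet? (exact,
-- incl. negative wraparound; the `none` case of memory[-1] is Python's IndexError, unreachable)
def pvAStep (code : List Char) (acc : List String × StateType × List Char) (ic : Int × Char) :
    List String × StateType × List Char :=
  let (tokens, state, memory) := acc
  let (i, c) := ic
  let next := pvClassify c
  let (tokens, memory) :=
    if (state, next) ∈ pvNormalTransitions then
      (tokens ++ [String.ofList memory], ([] : List Char))
    else if (state, next) = (.upper, .lower) ∧ memory.length > 1 then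
      (tokens ++ [String.ofList (PySem.List.slice memory none (some (-1)))],
       match PySem.List.pyGet? memory (-1) with
       | some x => [x]
       | none => [])
    else if (state, next) = (.special, .special) then
      if (c = ' ' ∨ c = '\t') ∧ PySem.List.pyGet? code (i - 1) = some c then
        if memory.length ≥ 20 then (tokens ++ [String.ofList memory], []) else (tokens, memory)
      else if PySem.Chars.isspace c ∨ (PySem.List.pyGet? code (i - 1)).any PySem.Chars.isspace then
        (tokens ++ [String.ofList memory], [])
      else (tokens, memory)
    else (tokens, memory)
  (tokens, next, memory ++ [c])

def code_to_tokens_simple_lossless (code : String) : List String :=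
  let cs := code.toList
  let res := (PySem.List.enumerate cs).foldl (pvAStep cs) ([], StateType.initial, [])
  if res.2.2 ≠ [] then res.1 ++ [String.ofList res.2.2] else res.1

-- ===== PORT B =====
-- Source B's cls: 0 = upper, 1 = lower, 2 = digit, 3 = special
def pvCls (c : Char) : Int :=
  if PySem.Chars.isupper c then 0
  else if PySem.Chars.islower c then 1
  else if PySem.Chars.isdigit c then 2
  else 3

-- Source B's loop body over i in range(1, n); acc = (bounds, start); in-range indexing via pyGetD
def pvBStep (cs : List Char) (acc : List Int × Int) (i : Int) : List Int × Int :=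
  let (bounds, start) := acc
  let cp := PySem.List.pyGetD cs (i - 1) ' '
  let ci := PySem.List.pyGetD cs i ' '
  let p := pvCls cp
  let q := pvCls ci
  let cut : Option Int :=
    if p ≠ q then
      if p = 0 ∧ q = 1 then
        if i - start > 1 then some (i - 1) else none
      else some i
    else if p = 3 then
      if (ci = ' ' ∨ ci = '\t') ∧ ci = cp then
        if i - start ≥ 20 then some i else none
      else if PySem.Chars.isspace ci ∨ PySem.Chars.isspace cp then some i
      else none
    else none
  match cut with
  | some b => (bounds ++ [b], b)
  | none => (bounds, start)

def code_to_tokens_simple_lossless_alt (code : String) : List String :=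
  let cs := code.toList
  let n : Int := cs.length
  if n = 0 then []
  else
    let res := (PySem.List.pyRange 1 n).foldl (pvBStep cs) ([(0 : Int)], (0 : Int))
    let bounds := res.1 ++ [n]
    (bounds.zip (PySem.List.slice bounds (some 1) none)).map
      (fun ab => String.ofList (PySem.List.slice cs (some ab.1) (some ab.2)))

-- ===== PRECONDITION & SPEC =====
def Spec_code_to_tokens_simple_lossless (code : String) (out : List String) : Prop := out = code_to_tokens_simple_lossless_alt code
instance (code : String) (out : List String) : Decidable (Spec_code_to_tokens_simple_lossless code out) := by unfold Spec_code_to_tokens_simple_lossless; infer_instance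

-- ===== CLAIM (what is proved, stated in full; the proofs are below) =====
def Claim_equal_code_to_tokens_simple_lossless : Prop := ∀ (code : String), Dom_code_to_tokens_simple_lossless code → Spec_code_to_tokens_simple_lossless code (code_to_tokens_simple_lossless code)

-- ===== LEMMAS AND PROOFS =====

-- A's fold over the first i characters / B's fold over range(1, i)
def runA (cs : List Char) (i : Nat) : List String × StateType × List Char :=
  (PySem.List.enumerate (cs.take i)).foldl (pvAStep cs) ([], StateType.initial, [])

def runB (cs : List Char) (i : Nat) : List Int × Int :=
  (PySem.List.pyRange 1 (i : Int)).foldl (pvBStep cs) ([(0 : Int)], (0 : Int))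

-- the tokens named by consecutive boundary pairs
def tokN (cs : List Char) (l : List Nat) : List String :=
  (l.zip l.tail).map (fun ab => String.ofList ((cs.drop ab.1).take (ab.2 - ab.1)))

-- the loop invariant tying A's (tokens, state, memory) to B's (bounds, start)
def pvInv (cs : List Char) (i : Nat) : Prop :=
  ∃ (bs : List Nat) (s : Nat),
    runB cs i = ((bs ++ [s]).map (fun k => (k : Int)), (s : Int)) ∧
    s < i ∧
    runA cs i = (tokN cs (bs ++ [s]), pvClassify (cs.getD (i - 1) ' '), (cs.drop s).take (i - s))


def stCode : StateType → Int
  | .initial => 4 | .upper => 0 | .lower => 1 | .number => 2 | .special => 3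

theorem cls_eq_stCode (c : Char) : pvCls c = stCode (pvClassify c) := by
  unfold pvCls pvClassify; split_ifs <;> rfl

theorem classify_ne_initial (c : Char) : pvClassify c ≠ .initial := by
  unfold pvClassify; split_ifs <;> simp

theorem mem_normal_iff (st nx : StateType) (h1 : st ≠ .initial) (h2 : nx ≠ .initial) :
    ((st, nx) ∈ pvNormalTransitions) ↔ (stCode st ≠ stCode nx ∧ ¬(stCode st = 0 ∧ stCode nx = 1)) := by
  cases st <;> cases nx <;> simp_all <;> decide

theorem eq_UL_iff (st nx : StateType) :
    ((st, nx) = (.upper, .lower)) ↔ (stCode st = 0 ∧ stCode nx = 1) := by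
  cases st <;> cases nx <;> decide

theorem eq_SS_iff (st nx : StateType) (h1 : st ≠ .initial) (h2 : nx ≠ .initial) :
    ((st, nx) = (.special, .special)) ↔ (stCode st = 3 ∧ stCode nx = 3) := by
  cases st <;> cases nx <;> simp_all <;> decide

theorem take_one_drop (cs : List Char) (i : Nat) (h : i < cs.length) : (cs.drop i).take 1 = [cs[i]] := by
  rw [List.drop_eq_getElem_cons h]; rfl

theorem take_two_drop (cs : List Char) (i : Nat) (h1 : 1 ≤ i) (h2 : i < cs.length) :
    (cs.drop (i-1)).take 2 = [cs[i-1], cs[i]] := by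
  rw [List.drop_eq_getElem_cons (by omega : i - 1 < cs.length)]
  rw [show i - 1 + 1 = i by omega, List.drop_eq_getElem_cons h2]
  rfl

theorem take_drop_succ (cs : List Char) (s i : Nat) (hs : s ≤ i) (h : i < cs.length) :
    (cs.drop s).take (i - s) ++ [cs[i]] = (cs.drop s).take (i + 1 - s) := by
  rw [show i + 1 - s = (i - s) + 1 by omega, List.take_add_one]
  rw [List.getElem?_drop, show s + (i - s) = i by omega, List.getElem?_eq_getElem h]
  simp

theorem mem_len (cs : List Char) (s i : Nat) (h : i ≤ cs.length) :
    ((cs.drop s).take (i-s)).length = i - s := by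
  simp [List.length_take, List.length_drop]; omega

theorem dropLast_mem (cs : List Char) (s i : Nat) (hs : s ≤ i) (h : i ≤ cs.length) :
    ((cs.drop s).take (i-s)).dropLast = (cs.drop s).take (i-s-1) := by
  rw [List.dropLast_eq_take, List.take_take]
  congr 1
  simp [List.length_take, List.length_drop]
  omega

theorem getLast?_mem (cs : List Char) (s i : Nat) (hs : s < i) (h : i ≤ cs.length) :
    ((cs.drop s).take (i-s)).getLast? = some (cs[i-1]'(by omega)) := by
  rw [List.getLast?_eq_getElem?, mem_len cs s i h]
  rw [List.getElem?_take, if_pos (by omega)]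
  rw [List.getElem?_drop, show s + (i - s - 1) = i - 1 by omega]
  rw [List.getElem?_eq_getElem (by omega)]


-- the shared splitting decision at position i (start of current token = s)
inductive PvDec
  | emit | retro | keep
deriving DecidableEq, Repr

def decide3 (cs : List Char) (s i : Nat) : PvDec :=
  let cp := cs.getD (i-1) ' '
  let ci := cs.getD i ' '
  let p := stCode (pvClassify cp)
  let q := stCode (pvClassify ci)
  if p ≠ q then
    if p = 0 ∧ q = 1 then (if i - s > 1 then .retro else .keep) else .emit
  else if p = 3 then
    if (ci = ' ' ∨ ci = '\t') ∧ ci = cp then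
      (if i - s ≥ 20 then .emit else .keep)
    else if PySem.Chars.isspace ci ∨ PySem.Chars.isspace cp then .emit
    else .keep
  else .keep

theorem bstep_eval (cs : List Char) (bs : List Nat) (s i : Nat) (h1 : 1 ≤ i) (hs : s < i)
    (h2 : i < cs.length) :
    pvBStep cs ((bs ++ [s]).map (fun k => (k : Int)), (s : Int)) (i : Int) =
      match decide3 cs s i with
      | .emit => ((bs ++ [s] ++ [i]).map (fun k => (k : Int)), (i : Int))
      | .retro => ((bs ++ [s] ++ [i-1]).map (fun k => (k : Int)), ((i-1 : Nat) : Int))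
      | .keep => ((bs ++ [s]).map (fun k => (k : Int)), (s : Int)) := by
  have hgd : cs.getD i ' ' = cs[i] := by
    rw [List.getD_eq_getElem?_getD, List.getElem?_eq_getElem h2]; rfl
  have hgd1 : cs.getD (i-1) ' ' = cs[i-1]'(by omega) := by
    rw [List.getD_eq_getElem?_getD, List.getElem?_eq_getElem (by omega : i - 1 < cs.length)]; rfl
  have hcast : (i : Int) - 1 = ((i - 1 : Nat) : Int) := by omega
  have hpD1 : PySem.List.pyGetD cs ((i:Int) - 1) ' ' = cs[i-1]'(by omega) := by
    rw [hcast, PySem.List.pyGetD_natCast, hgd1]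
  have hpD2 : PySem.List.pyGetD cs ((i:Int)) ' ' = cs[i] := by
    rw [PySem.List.pyGetD_natCast, hgd]
  have hgt : ((1 : Int) < (i : Int) - (s : Int)) ↔ (1 < i - s) := by omega
  have h20 : ((20 : Int) ≤ (i : Int) - (s : Int)) ↔ (20 ≤ i - s) := by omega
  unfold pvBStep decide3
  simp only [hpD1, hpD2, hgd, hgd1, cls_eq_stCode, gt_iff_lt, ge_iff_le, hgt, h20]
  split_ifs <;> simp [List.map_append] <;> omega

theorem astep_eval (cs : List Char) (tok : List String) (s i : Nat) (hs : s < i)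
    (h2 : i < cs.length) :
    pvAStep cs (tok, pvClassify (cs[i-1]'(by omega)), (cs.drop s).take (i-s)) ((i : Int), cs[i]) =
      match decide3 cs s i with
      | .emit => (tok ++ [String.ofList ((cs.drop s).take (i-s))], pvClassify cs[i], [cs[i]])
      | .retro => (tok ++ [String.ofList ((cs.drop s).take (i-1-s))], pvClassify cs[i],
                   [cs[i-1]'(by omega), cs[i]])
      | .keep => (tok, pvClassify cs[i], (cs.drop s).take (i+1-s)) := by
  have hi1 : i - 1 < cs.length := by omega
  have hgd : cs.getD i ' ' = cs[i] := by
    rw [List.getD_eq_getElem?_getD, List.getElem?_eq_getElem h2]; rfl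
  have hgd1 : cs.getD (i-1) ' ' = cs[i-1] := by
    rw [List.getD_eq_getElem?_getD, List.getElem?_eq_getElem hi1]; rfl
  have hcast : (i : Int) - 1 = ((i - 1 : Nat) : Int) := by omega
  have hpg : PySem.List.pyGet? cs ((i:Int) - 1) = some (cs[i-1]) := by
    rw [hcast, PySem.List.pyGet?_natCast, List.getElem?_eq_getElem hi1]
  have hMlen : ((cs.drop s).take (i - s)).length = i - s := mem_len cs s i (le_of_lt h2)
  have hlast : PySem.List.pyGet? ((cs.drop s).take (i-s)) (-1) = some cs[i-1] :=
    by rw [PySem.List.pyGet?_neg_one, getLast?_mem cs s i hs (le_of_lt h2)]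
  have hdl : PySem.List.slice ((cs.drop s).take (i-s)) none (some (-1)) = (cs.drop s).take (i-1-s) := by
    rw [PySem.List.slice_to_neg_one, dropLast_mem cs s i (le_of_lt hs) (le_of_lt h2),
        show i - s - 1 = i - 1 - s by omega]
  have hsome : (some (cs[i-1]'hi1) = some (cs[i]'h2)) ↔ (cs[i] = cs[i-1]) := by
    constructor <;> (intro h; simp_all)
  have hmem := mem_normal_iff (pvClassify (cs[i-1]'hi1)) (pvClassify cs[i])
    (classify_ne_initial _) (classify_ne_initial _)
  have hul := eq_UL_iff (pvClassify (cs[i-1]'hi1)) (pvClassify cs[i])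
  have hss := eq_SS_iff (pvClassify (cs[i-1]'hi1)) (pvClassify cs[i])
    (classify_ne_initial _) (classify_ne_initial _)
  have htds := take_drop_succ cs s i (le_of_lt hs) h2
  unfold pvAStep decide3
  simp only [hgd, hgd1, hpg, hlast, hdl, hsome, hmem, hul, hss, hMlen, Option.any_some,
    gt_iff_lt, ge_iff_le]
  generalize hA : stCode (pvClassify (cs[i-1]'hi1)) = a
  generalize hB : stCode (pvClassify (cs[i]'h2)) = b
  have h01' : ¬(a = 0 ∧ a = 1) := by omega
  by_cases hab : a = b
  · subst hab
    by_cases h3 : a = 3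
    · by_cases hW : (cs[i] = ' ' ∨ cs[i] = '\t') ∧ cs[i] = cs[i-1]
      · obtain ⟨hw1, hw2⟩ := hW
        rw [hw2] at hw1
        by_cases h20 : 20 ≤ i - s
        · simp [h3, hw1, hw2, h20]
        · rw [hw2] at htds
          simp [h3, hw1, hw2, h20, htds]
      · by_cases hS : PySem.Chars.isspace cs[i] = true ∨ PySem.Chars.isspace cs[i-1] = true
        · simp [h3, hW, hS]
        · simp [h3, hW, hS, htds]
    · simp [h01', h3, htds]
  · by_cases h01 : a = 0 ∧ b = 1
    · by_cases hL1 : 1 < i - s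
      · simp [h01, hL1]
      · simp [h01, hL1, htds]
    · simp [hab, h01]

theorem enumerate_append_singleton {α : Type} (xs : List α) (y : α) (s : Int) :
    PySem.List.enumerate (xs ++ [y]) s = PySem.List.enumerate xs s ++ [(s + xs.length, y)] := by
  induction xs generalizing s with
  | nil => simp [PySem.List.enumerate]
  | cons a t ih => simp [PySem.List.enumerate, ih]; ring_nf

theorem runA_succ (cs : List Char) (i : Nat) (h : i < cs.length) :
    runA cs (i + 1) = pvAStep cs (runA cs i) ((i : Int), cs[i]) := by
  unfold runA
  rw [List.take_add_one, List.getElem?_eq_getElem h]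
  simp only [Option.toList_some]
  rw [enumerate_append_singleton]
  simp [List.length_take, Nat.min_eq_left (Nat.le_of_lt h)]

theorem runB_succ (cs : List Char) (i : Nat) (h : 1 ≤ i) :
    runB cs (i + 1) = pvBStep cs (runB cs i) (i : Int) := by
  unfold runB
  have : ((i + 1 : Nat) : Int) = ((i : Int) + 1) := by push_cast; ring
  rw [this, PySem.List.pyRange_one_succ_right (by exact_mod_cast h), List.foldl_append]
  simp

theorem zip_tail_append (l : List Nat) (x : Nat) (h : l ≠ []) :
    (l ++ [x]).zip (l ++ [x]).tail = l.zip l.tail ++ [(l.getLast h, x)] := by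
  induction l with
  | nil => simp at h
  | cons a t ih =>
    cases t with
    | nil => simp
    | cons b u => simp_all [List.getLast]

theorem tokN_append (cs : List Char) (bs : List Nat) (s t : Nat) :
    tokN cs (bs ++ [s] ++ [t]) = tokN cs (bs ++ [s]) ++ [String.ofList ((cs.drop s).take (t - s))] := by
  unfold tokN
  rw [zip_tail_append (bs ++ [s]) t (by simp)]
  simp

theorem inv_base (cs : List Char) (h : 1 ≤ cs.length) : pvInv cs 1 := by
  refine ⟨[], 0, ?_, Nat.zero_lt_one, ?_⟩
  · unfold runB
    simp [PySem.List.pyRange_one_eq_nil (le_refl (1:Int))]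
  · unfold runA
    have h0 : 0 < cs.length := h
    rw [show (1:Nat) = 0 + 1 by rfl, List.take_add_one, List.getElem?_eq_getElem h0]
    simp only [List.take_zero, Option.toList_some, List.nil_append]
    show (PySem.List.enumerate [cs[0]]).foldl (pvAStep cs) ([], StateType.initial, []) = _
    simp only [PySem.List.enumerate, List.foldl_cons, List.foldl_nil]
    unfold pvAStep
    simp only []
    have hmem : (StateType.initial, pvClassify cs[0]) ∉ pvNormalTransitions := by
      cases hc : pvClassify cs[0] <;> decide
    have hne1 : ¬ ((StateType.initial, pvClassify cs[0]) = (StateType.upper, StateType.lower) ∧ ([]:List Char).length > 1) := by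
      rintro ⟨h1, -⟩; cases h1
    have hne2 : (StateType.initial, pvClassify cs[0]) ≠ (StateType.special, StateType.special) := by
      intro h1; cases h1
    rw [if_neg hmem, if_neg hne1, if_neg hne2]
    unfold tokN
    have ht : List.take 1 cs = [cs[0]] := by
      rw [show (1:Nat) = 0 + 1 by rfl, List.take_add_one, List.getElem?_eq_getElem h0]; simp
    simp [List.getD, ht, List.getElem?_eq_getElem h0]

theorem inv_step (cs : List Char) (i : Nat) (h1 : 1 ≤ i) (h2 : i < cs.length) :
    pvInv cs i → pvInv cs (i + 1) := by
  rintro ⟨bs, s, hB, hs, hA⟩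
  have hi1 : i - 1 < cs.length := by omega
  have hgd1 : cs.getD (i-1) ' ' = cs[i-1] := by
    rw [List.getD_eq_getElem?_getD, List.getElem?_eq_getElem hi1]; rfl
  have hgd' : cs.getD (i+1-1) ' ' = cs[i] := by
    rw [show i + 1 - 1 = i by omega, List.getD_eq_getElem?_getD, List.getElem?_eq_getElem h2]; rfl
  rw [hgd1] at hA
  have hAs := runA_succ cs i h2
  rw [hA, astep_eval cs _ s i hs h2] at hAs
  have hBs := runB_succ cs i h1
  rw [hB, bstep_eval cs bs s i h1 hs h2] at hBs
  cases hd : decide3 cs s i <;> rw [hd] at hAs hBs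
  · -- emit: new token ends at i
    refine ⟨bs ++ [s], i, hBs, by omega, ?_⟩
    rw [hAs, tokN_append, hgd', show i + 1 - i = 1 by omega, take_one_drop cs i h2]
  · -- retro: new token ends at i-1
    refine ⟨bs ++ [s], i - 1, hBs, by omega, ?_⟩
    rw [hAs, tokN_append, hgd', show i + 1 - (i - 1) = 2 by omega, take_two_drop cs i h1 h2]
  · -- keep: token continues
    exact ⟨bs, s, hBs, by omega, by rw [hAs, hgd']⟩

theorem inv_all (cs : List Char) (i : Nat) (h1 : 1 ≤ i) (h2 : i ≤ cs.length) : pvInv cs i := by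
  induction i, h1 using Nat.le_induction with
  | base => exact inv_base cs (by omega)
  | succ n hn ih => exact inv_step cs n hn (by omega) (ih (by omega))

theorem tokN_cast (cs : List Char) (M : List Nat) :
    ((M.map (fun k => (k:Int))).zip ((M.map (fun k => (k:Int))).tail)).map
      (fun ab => String.ofList (PySem.List.slice cs (some ab.1) (some ab.2))) = tokN cs M := by
  induction M with
  | nil => rfl
  | cons a t ih =>
    cases t with
    | nil => rfl
    | cons b u =>
      rw [show ((((a::b::u).map (fun k => (k:Int))).zip (((a::b::u).map (fun k => (k:Int))).tail)).map
            (fun ab => String.ofList (PySem.List.slice cs (some ab.1) (some ab.2)))) =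
          String.ofList (PySem.List.slice cs (some (a:Int)) (some (b:Int))) ::
            ((((b::u).map (fun k => (k:Int))).zip (((b::u).map (fun k => (k:Int))).tail)).map
            (fun ab => String.ofList (PySem.List.slice cs (some ab.1) (some ab.2)))) from rfl]
      rw [show tokN cs (a::b::u) = String.ofList ((cs.drop a).take (b - a)) :: tokN cs (b::u) from rfl]
      rw [PySem.List.slice_natCast, ih]

-- ===== VERDICT (by name: the statement is the Claim_ definition above) =====
theorem code_to_tokens_simple_lossless_spec : Claim_equal_code_to_tokens_simple_lossless := by
  unfold Claim_equal_code_to_tokens_simple_lossless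
  intro code _
  unfold Spec_code_to_tokens_simple_lossless code_to_tokens_simple_lossless
    code_to_tokens_simple_lossless_alt
  by_cases hnil : code.toList = []
  · rw [hnil]
    simp [PySem.List.enumerate]
  · have hlen : 1 ≤ code.toList.length := by
      cases h : code.toList with
      | nil => exact absurd h hnil
      | cons a t => simp
    have hn0 : ¬((code.toList.length : Int) = 0) := by
      intro h
      rw [show ((code.toList.length : Int)) = ((code.toList.length : Nat) : Int) from rfl] at h
      have := Int.ofNat_inj.mp h
      omega
    obtain ⟨bs, s, hB, hs, hA⟩ := inv_all code.toList code.toList.length hlen le_rfl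
    unfold runA at hA
    rw [List.take_length] at hA
    unfold runB at hB
    have hmemne : (code.toList.drop s).take (code.toList.length - s) ≠ [] := by
      have hl := mem_len code.toList s code.toList.length le_rfl
      intro h
      rw [h] at hl
      simp only [List.length_nil] at hl
      omega
    simp only [hA, hB, hmemne, ne_eq, not_false_iff, if_true, if_neg hn0]
    rw [PySem.List.slice_from_one]
    rw [show ((bs ++ [s]).map (fun k => (k:Int))) ++ [(code.toList.length : Int)] =
        ((bs ++ [s] ++ [code.toList.length]).map (fun k => (k:Int))) by simp]
    rw [tokN_cast, tokN_append]
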